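-- pv_equiv track=rewrite | github.com/sakshi-adhav/spos | macro.py | pass_one
-- ===== SOURCE A (Python) =====
-- def pass_one(source_code):
--     MNT = {}
--     MDT = []
--     intermediate_code = []
--     mdt_index = 0
--     in_macro = False
--
--     for line in source_code:
--         tokens = line.strip().split()
--
--         # Check for the start of macro definition
--         if tokens[0].lower() == 'macro':
--             in_macro = True
--             macro_name = tokens[1]
--             params = tokens[2:]  # Macro parameters
--             MNT[macro_name] = {"mdt_index": mdt_index, "param_count": len(params)}
--             continue
--
--         # Check for the end of macro definition
--         if tokens[0].lower() == 'mend':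
--             MDT.append({"line": 'MEND'})
--             in_macro = False
--             mdt_index += 1
--             continue
--
--         if in_macro:
--             # Add the macro body to MDT
--             MDT.append({"line": line})
--             mdt_index += 1
--         else:
--             # Add non-macro lines to intermediate code
--             intermediate_code.append(line)
--
--     return MNT, MDT, intermediate_code
-- ===== SOURCE B (Python) =====
-- def pass_one(source_code):
--     # Pass 1: classify every line, tracking whether we are inside a macro body.
--     tagged = []
--     in_macro = False
--     for line in source_code:
--         tokens = line.strip().split()
--         head = tokens[0].lower()
--         if head == 'macro':
--             tagged.append((tokens, 'macro'))
--             in_macro = True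
--         elif head == 'mend':
--             tagged.append((line, 'mend'))
--             in_macro = False
--         elif in_macro:
--             tagged.append((line, 'body'))
--         else:
--             tagged.append((line, 'plain'))
--
--     # Pass 2: build each table from the tags.
--     MDT = [{"line": 'MEND' if kind == 'mend' else item}
--            for item, kind in tagged if kind in ('mend', 'body')]
--     intermediate_code = [item for item, kind in tagged if kind == 'plain']
--
--     MNT = {}
--     mdt_index = 0
--     for item, kind in tagged:
--         if kind == 'macro':
--             MNT[item[1]] = {"mdt_index": mdt_index, "param_count": len(item) - 2}
--         elif kind in ('mend', 'body'):
--             mdt_index += 1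
--     return MNT, MDT, intermediate_code
-- ===== Notes on version B (the rewrite author's own statement) =====
-- stated objective: alternative
-- what changed: Replaces A's single flag-driven loop that builds all three tables at once by a tag-then-build pipeline: a first pass classifies each line (macro header / mend / body / plain), then MDT and the intermediate code are built by comprehensions over the tags and MNT by a small counting pass; Pre_ excludes only the inputs on which both programs raise IndexError (a blank line, or a 'macro' header with no name).
import Mathlib
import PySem

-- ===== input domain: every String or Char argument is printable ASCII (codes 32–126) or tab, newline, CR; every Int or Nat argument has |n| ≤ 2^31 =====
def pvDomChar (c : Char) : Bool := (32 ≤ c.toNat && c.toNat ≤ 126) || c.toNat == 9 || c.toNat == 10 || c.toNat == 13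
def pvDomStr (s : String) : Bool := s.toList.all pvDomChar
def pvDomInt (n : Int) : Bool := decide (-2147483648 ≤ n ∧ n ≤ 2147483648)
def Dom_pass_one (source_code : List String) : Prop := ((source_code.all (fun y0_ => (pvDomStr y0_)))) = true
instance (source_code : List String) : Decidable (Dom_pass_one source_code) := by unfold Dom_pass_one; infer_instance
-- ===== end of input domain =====

-- B replaces A's single flag-driven loop by a tag-then-build pipeline: a classification
-- pass labels every line, then each of the three tables is built separately from the tags
-- (objective: alternative decomposition; same asymptotic cost; equivalence on Pre_).


-- ===== PORT A =====
-- state: (MNT, MDT, intermediate_code, mdt_index, in_macro)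
def pvStateA := PySem.Dict String (List (String × Int)) × List (List (String × String)) × List String × Int × Bool

-- one iteration of A's for-loop; the `[]`/missing-name cases are where Python raises IndexError (excluded by Pre_)
def pvStepA (st : pvStateA) (line : String) : pvStateA :=
  let (MNT, MDT, ic, mdt_index, in_macro) := st
  let tokens := PySem.Str.split₀ (PySem.Str.strip line)
  match tokens with
  | [] => st  -- IndexError in Python; excluded by Pre_
  | t0 :: rest =>
    if PySem.Str.lower t0 = "macro" then
      match rest with
      | [] => st  -- IndexError in Python; excluded by Pre_
      | name :: params =>
        (MNT.insert name [("mdt_index", mdt_index), ("param_count", (params.length : Int))],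
         MDT, ic, mdt_index, true)
    else if PySem.Str.lower t0 = "mend" then
      (MNT, MDT ++ [[("line", "MEND")]], ic, mdt_index + 1, false)
    else if in_macro then
      (MNT, MDT ++ [[("line", line)]], ic, mdt_index + 1, in_macro)
    else
      (MNT, MDT, ic ++ [line], mdt_index, in_macro)

def pass_one (source_code : List String) : (List (String × List (String × Int))) × (List (List (String × String))) × List String :=
  let st := source_code.foldl pvStepA (PySem.Dict.empty, [], [], 0, false)
  (st.1.items, st.2.1, st.2.2.1)

-- ===== PORT B =====
-- a tag for one classified line of Source B's first pass
inductive PvKind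
  | macroK : List String → PvKind   -- ('macro' header: its token list)
  | mendK  : String → PvKind
  | bodyK  : String → PvKind
  | plainK : String → PvKind
deriving DecidableEq, Repr

-- first pass of Source B: classify a line, threading the in_macro flag
def pvTagStep (st : List PvKind × Bool) (line : String) : List PvKind × Bool :=
  let (tagged, in_macro) := st
  let tokens := PySem.Str.split₀ (PySem.Str.strip line)
  match tokens with
  | [] => st  -- IndexError in Python; excluded by Pre_
  | t0 :: _ =>
    if PySem.Str.lower t0 = "macro" then (tagged ++ [.macroK tokens], true)
    else if PySem.Str.lower t0 = "mend" then (tagged ++ [.mendK line], false)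
    else if in_macro then (tagged ++ [.bodyK line], in_macro)
    else (tagged ++ [.plainK line], in_macro)

-- second pass, MDT comprehension
def pvMdtOf (tagged : List PvKind) : List (List (String × String)) :=
  tagged.filterMap fun k => match k with
    | .mendK _ => some [("line", "MEND")]
    | .bodyK l => some [("line", l)]
    | _ => none

-- second pass, intermediate_code comprehension
def pvIcOf (tagged : List PvKind) : List String :=
  tagged.filterMap fun k => match k with
    | .plainK l => some l
    | _ => none

-- second pass, MNT loop: state (MNT, mdt_index)
def pvMntStep (st : PySem.Dict String (List (String × Int)) × Int) (k : PvKind) :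
    PySem.Dict String (List (String × Int)) × Int :=
  match k with
  | .macroK toks =>
    match toks with
    | _ :: name :: params =>
      (st.1.insert name [("mdt_index", st.2), ("param_count", (params.length : Int))], st.2)
    | _ => st  -- IndexError in Python; excluded by Pre_
  | .mendK _ => (st.1, st.2 + 1)
  | .bodyK _ => (st.1, st.2 + 1)
  | .plainK _ => st

def pass_one_alt (source_code : List String) : (List (String × List (String × Int))) × (List (List (String × String))) × List String :=
  let tagged := (source_code.foldl pvTagStep ([], false)).1
  let MDT := pvMdtOf tagged
  let intermediate_code := pvIcOf tagged
  let mnt := tagged.foldl pvMntStep (PySem.Dict.empty, 0)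
  (mnt.1.items, MDT, intermediate_code)

-- ===== PRECONDITION & SPEC =====
-- Pre_ excludes exactly the inputs on which both Pythons raise IndexError: a line whose
-- token list is empty (blank line), or a 'macro' header with no macro name.
def Pre_pass_one (source_code : List String) : Prop :=
  ∀ line ∈ source_code,
    (PySem.Str.split₀ (PySem.Str.strip line)) ≠ [] ∧
    (PySem.Str.lower ((PySem.Str.split₀ (PySem.Str.strip line)).headD "") = "macro" →
      2 ≤ (PySem.Str.split₀ (PySem.Str.strip line)).length)
instance (source_code : List String) : Decidable (Pre_pass_one source_code) := by
  unfold Pre_pass_one; infer_instance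
def pvWitness_pass_one : List String :=
  ["MOV A", "macro M1 &X", "ADD &X", "mend", "M1 5"]
def Spec_pass_one (source_code : List String) (out : (List (String × List (String × Int))) × (List (List (String × String))) × List String) : Prop := out = pass_one_alt source_code
instance (source_code : List String) (out : (List (String × List (String × Int))) × (List (List (String × String))) × List String) : Decidable (Spec_pass_one source_code out) := by unfold Spec_pass_one; infer_instance

-- ===== CLAIM =====
def Claim_equal_pass_one : Prop := ∀ (source_code : List String), Dom_pass_one source_code → Pre_pass_one source_code → Spec_pass_one source_code (pass_one source_code)

-- ===== LEMMAS AND PROOFS =====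

-- recursive characterisation of Source B's tagging pass
def pvTagRec (flag : Bool) : List String → List PvKind
  | [] => []
  | line :: ls =>
    match PySem.Str.split₀ (PySem.Str.strip line) with
    | [] => pvTagRec flag ls
    | t0 :: _ =>
      if PySem.Str.lower t0 = "macro" then
        .macroK (PySem.Str.split₀ (PySem.Str.strip line)) :: pvTagRec true ls
      else if PySem.Str.lower t0 = "mend" then .mendK line :: pvTagRec false ls
      else if flag then .bodyK line :: pvTagRec flag ls
      else .plainK line :: pvTagRec flag ls

lemma pvTag_eq : ∀ (ls : List String) (acc : List PvKind) (flag : Bool),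
    ls.foldl pvTagStep (acc, flag) =
      (acc ++ pvTagRec flag ls, (ls.foldl pvTagStep (acc, flag)).2) := by
  intro ls
  induction ls with
  | nil => intro acc flag; simp [pvTagRec]
  | cons line ls ih =>
    intro acc flag
    simp only [List.foldl_cons, pvTagRec]
    cases hts : PySem.Str.split₀ (PySem.Str.strip line) with
    | nil => simpa [pvTagStep, hts] using ih acc flag
    | cons t0 rest =>
      by_cases hm : PySem.Str.lower t0 = "macro"
      · have h' := ih (acc ++ [PvKind.macroK (t0 :: rest)]) true
        rw [List.append_assoc, List.singleton_append] at h'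
        simpa [pvTagStep, hts, hm] using h'
      · by_cases hme : PySem.Str.lower t0 = "mend"
        · have h' := ih (acc ++ [PvKind.mendK line]) false
          rw [List.append_assoc, List.singleton_append] at h'
          simpa [pvTagStep, hts, hm, hme] using h'
        · cases flag with
          | true =>
            have h' := ih (acc ++ [PvKind.bodyK line]) true
            rw [List.append_assoc, List.singleton_append] at h'
            simpa [pvTagStep, hts, hm, hme] using h'
          | false =>
            have h' := ih (acc ++ [PvKind.plainK line]) false
            rw [List.append_assoc, List.singleton_append] at h'
            simpa [pvTagStep, hts, hm, hme] using h'

def pvPost (st : pvStateA) : (List (String × List (String × Int))) × (List (List (String × String))) × List String :=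
  (st.1.items, st.2.1, st.2.2.1)

-- step lemmas: one iteration of A's loop / of B's tagging, per branch
lemma pvStepA_macro (MNT : PySem.Dict String (List (String × Int))) (MDT : List (List (String × String)))
    (ic : List String) (idx : Int) (flag : Bool) (line t0 name : String) (params : List String)
    (hts : PySem.Str.split₀ (PySem.Str.strip line) = t0 :: name :: params)
    (hm : PySem.Str.lower t0 = "macro") :
    pvStepA (MNT, MDT, ic, idx, flag) line =
      (MNT.insert name [("mdt_index", idx), ("param_count", (params.length : Int))], MDT, ic, idx, true) := by
  simp [pvStepA, hts, hm]

lemma pvStepA_mend (MNT : PySem.Dict String (List (String × Int))) (MDT : List (List (String × String)))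
    (ic : List String) (idx : Int) (flag : Bool) (line t0 : String) (rest : List String)
    (hts : PySem.Str.split₀ (PySem.Str.strip line) = t0 :: rest)
    (_hm : ¬ PySem.Str.lower t0 = "macro") (hme : PySem.Str.lower t0 = "mend") :
    pvStepA (MNT, MDT, ic, idx, flag) line = (MNT, MDT ++ [[("line", "MEND")]], ic, idx + 1, false) := by
  simp [pvStepA, hts, hme]

lemma pvStepA_other (MNT : PySem.Dict String (List (String × Int))) (MDT : List (List (String × String)))
    (ic : List String) (idx : Int) (flag : Bool) (line t0 : String) (rest : List String)
    (hts : PySem.Str.split₀ (PySem.Str.strip line) = t0 :: rest)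
    (hm : ¬ PySem.Str.lower t0 = "macro") (hme : ¬ PySem.Str.lower t0 = "mend") :
    pvStepA (MNT, MDT, ic, idx, flag) line =
      (if flag then (MNT, MDT ++ [[("line", line)]], ic, idx + 1, flag)
       else (MNT, MDT, ic ++ [line], idx, flag)) := by
  by_cases hf : flag = true <;> simp [pvStepA, hts, hm, hme, hf]

lemma pvTagRec_macro (flag : Bool) (line t0 : String) (rest ls : List String)
    (hts : PySem.Str.split₀ (PySem.Str.strip line) = t0 :: rest)
    (hm : PySem.Str.lower t0 = "macro") :
    pvTagRec flag (line :: ls) = .macroK (t0 :: rest) :: pvTagRec true ls := by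
  simp [pvTagRec, hts, hm]

lemma pvTagRec_mend (flag : Bool) (line t0 : String) (rest ls : List String)
    (hts : PySem.Str.split₀ (PySem.Str.strip line) = t0 :: rest)
    (_hm : ¬ PySem.Str.lower t0 = "macro") (hme : PySem.Str.lower t0 = "mend") :
    pvTagRec flag (line :: ls) = .mendK line :: pvTagRec false ls := by
  simp [pvTagRec, hts, hme]

lemma pvTagRec_other (flag : Bool) (line t0 : String) (rest ls : List String)
    (hts : PySem.Str.split₀ (PySem.Str.strip line) = t0 :: rest)
    (hm : ¬ PySem.Str.lower t0 = "macro") (hme : ¬ PySem.Str.lower t0 = "mend") :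
    pvTagRec flag (line :: ls) =
      (if flag then PvKind.bodyK line else PvKind.plainK line) :: pvTagRec flag ls := by
  by_cases hf : flag = true <;> simp [pvTagRec, hts, hm, hme, hf]

lemma pv_main (ls : List String)
    (h : ∀ line ∈ ls,
      (PySem.Str.split₀ (PySem.Str.strip line)) ≠ [] ∧
      (PySem.Str.lower ((PySem.Str.split₀ (PySem.Str.strip line)).headD "") = "macro" →
        2 ≤ (PySem.Str.split₀ (PySem.Str.strip line)).length)) :
    ∀ (MNT : PySem.Dict String (List (String × Int))) (MDT : List (List (String × String)))
      (ic : List String) (idx : Int) (flag : Bool),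
      pvPost (ls.foldl pvStepA (MNT, MDT, ic, idx, flag)) =
        (((pvTagRec flag ls).foldl pvMntStep (MNT, idx)).1.items,
         MDT ++ pvMdtOf (pvTagRec flag ls),
         ic ++ pvIcOf (pvTagRec flag ls)) := by
  induction ls with
  | nil => intro MNT MDT ic idx flag; simp [pvTagRec, pvMdtOf, pvIcOf, pvPost]
  | cons line ls ih =>
    intro MNT MDT ic idx flag
    have hl := h line (List.mem_cons_self ..)
    have ihls := ih (fun l hm => h l (List.mem_cons_of_mem _ hm))
    obtain ⟨h1, h2⟩ := hl
    cases hts : PySem.Str.split₀ (PySem.Str.strip line) with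
    | nil => exact absurd hts h1
    | cons t0 rest =>
      by_cases hm : PySem.Str.lower t0 = "macro"
      · cases rest with
        | nil =>
          exfalso
          have := h2 (by simp [hts, hm])
          simp [hts] at this
        | cons name params =>
          rw [List.foldl_cons, pvStepA_macro MNT MDT ic idx flag line t0 name params hts hm,
            pvTagRec_macro flag line t0 (name :: params) ls hts hm, ihls]
          simp [pvMntStep, pvMdtOf, pvIcOf]
      · by_cases hme : PySem.Str.lower t0 = "mend"
        · rw [List.foldl_cons, pvStepA_mend MNT MDT ic idx flag line t0 rest hts hm hme,
            pvTagRec_mend flag line t0 rest ls hts hm hme, ihls]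
          simp [pvMntStep, pvMdtOf, pvIcOf]
        · rw [List.foldl_cons, pvStepA_other MNT MDT ic idx flag line t0 rest hts hm hme,
            pvTagRec_other flag line t0 rest ls hts hm hme]
          cases flag with
          | true => rw [if_pos rfl, ihls]; simp [pvMntStep, pvMdtOf, pvIcOf]
          | false => rw [if_neg (by simp), ihls]; simp [pvMntStep, pvMdtOf, pvIcOf]

-- ===== VERDICT =====
theorem pass_one_spec : Claim_equal_pass_one := by
  intro source_code _ hpre
  unfold Spec_pass_one pass_one pass_one_alt
  rw [pvTag_eq source_code [] false]
  simpa [pvPost] using pv_main source_code hpre PySem.Dict.empty [] [] 0 false
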